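-- pv_equiv track=rewrite | github.com/HarshalCreates/Advanced-RAG-System-with-Dynamic-Model-Adaptation | app/intelligence/math_extraction.py | _prepare_for_sympy
-- ===== SOURCE A (Python) =====
-- def _prepare_for_sympy(latex_code: str) -> str:
--     """Prepare LaTeX code for SymPy parsing."""
--
--     # Basic cleanup for SymPy compatibility
--     cleaned = latex_code
--
--     # Replace common LaTeX constructs
--     replacements = {
--         '\\\\cdot': '*',
--         '\\\\times': '*',
--         '\\\\div': '/',
--         '\\\\pm': '+',
--         '\\\\mp': '-',
--         '\\\\neq': '!=',
--         '\\\\leq': '<=',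
--         '\\\\geq': '>=',
--         '\\\\ll': '<<',
--         '\\\\gg': '>>'
--     }
--
--     for old, new in replacements.items():
--         cleaned = cleaned.replace(old, new)
--
--     return cleaned
-- ===== SOURCE B (Python) =====
-- import re
--
-- _REPLACEMENTS = {
--     '\\\\cdot': '*',
--     '\\\\times': '*',
--     '\\\\div': '/',
--     '\\\\pm': '+',
--     '\\\\mp': '-',
--     '\\\\neq': '!=',
--     '\\\\leq': '<=',
--     '\\\\geq': '>=',
--     '\\\\ll': '<<',
--     '\\\\gg': '>>'
-- }
--
-- _PATTERN = re.compile('|'.join(re.escape(k) for k in _REPLACEMENTS))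
--
--
-- def _prepare_for_sympy(latex_code: str) -> str:
--     """Prepare LaTeX code for SymPy parsing (single regex pass)."""
--     return _PATTERN.sub(lambda m: _REPLACEMENTS[m.group(0)], latex_code)
-- ===== Notes on version B (the rewrite author's own statement) =====
-- stated objective: idiomatic
-- what changed: Replaced the ten sequential full-string str.replace passes with one compiled alternation regex doing a single left-to-right substitution pass over the input.
import Mathlib
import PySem

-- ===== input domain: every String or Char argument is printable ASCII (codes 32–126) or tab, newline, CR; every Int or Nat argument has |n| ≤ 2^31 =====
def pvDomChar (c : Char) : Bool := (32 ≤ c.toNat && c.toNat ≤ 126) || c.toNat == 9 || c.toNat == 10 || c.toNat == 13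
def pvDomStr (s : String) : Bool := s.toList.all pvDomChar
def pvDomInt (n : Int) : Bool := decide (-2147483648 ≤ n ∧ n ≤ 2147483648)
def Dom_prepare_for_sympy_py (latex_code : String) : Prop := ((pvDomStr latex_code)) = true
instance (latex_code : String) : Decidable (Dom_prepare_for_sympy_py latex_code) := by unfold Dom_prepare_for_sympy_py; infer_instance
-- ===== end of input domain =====

-- B replaces A's ten sequential full-string `.replace` passes by a single left-to-right
-- substitution pass (a compiled alternation regex in Python); same return value, objective: idiomatic single pass.

-- ===== PORT A =====
-- the dict of replacements, in Python insertion order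
def pvReplacements : List (String × String) :=
  [("\\\\cdot", "*"), ("\\\\times", "*"), ("\\\\div", "/"), ("\\\\pm", "+"),
   ("\\\\mp", "-"), ("\\\\neq", "!="), ("\\\\leq", "<="), ("\\\\geq", ">="),
   ("\\\\ll", "<<"), ("\\\\gg", ">>")]

def prepare_for_sympy_py (latex_code : String) : String :=
  pvReplacements.foldl (fun cleaned ov => PySem.Str.replace cleaned ov.1 ov.2) latex_code

-- ===== PORT B =====
-- B's alternation table (the compiled regex's alternatives, in order, with their replacements)
def pvTableB : List (List Char × List Char) :=
  [("\\\\cdot".toList, "*".toList), ("\\\\times".toList, "*".toList),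
   ("\\\\div".toList, "/".toList), ("\\\\pm".toList, "+".toList),
   ("\\\\mp".toList, "-".toList), ("\\\\neq".toList, "!=".toList),
   ("\\\\leq".toList, "<=".toList), ("\\\\geq".toList, ">=".toList),
   ("\\\\ll".toList, "<<".toList), ("\\\\gg".toList, ">>".toList)]

-- try the alternatives in order at the current position (what the regex engine does);
-- on a match return the replacement and (key length - 1) chars still to skip past the head
def pvTryKeys : List (List Char × List Char) → List Char → Option (List Char × Nat)
  | [], _ => none
  | (k, v) :: rest, l => if k.isPrefixOf l then some (v, k.length - 1) else pvTryKeys rest l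

-- one left-to-right pass: the port of `_PATTERN.sub(lambda m: _REPLACEMENTS[m.group(0)], s)`
def pvSub : List Char → List Char
  | [] => []
  | c :: t =>
    match pvTryKeys pvTableB (c :: t) with
    | some (v, n) => v ++ pvSub (t.drop n)
    | none => c :: pvSub t
termination_by l => l.length
decreasing_by all_goals simp [List.length_drop]

def prepare_for_sympy_py_alt (latex_code : String) : String :=
  String.ofList (pvSub latex_code.toList)

-- ===== PRECONDITION & SPEC =====
def Spec_prepare_for_sympy_py (latex_code : String) (out : String) : Prop := out = prepare_for_sympy_py_alt latex_code
instance (latex_code : String) (out : String) : Decidable (Spec_prepare_for_sympy_py latex_code out) := by unfold Spec_prepare_for_sympy_py; infer_instance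

-- ===== CLAIM (what is proved, stated in full; the proofs are below) =====
def Claim_equal_prepare_for_sympy_py : Prop := ∀ (latex_code : String), Dom_prepare_for_sympy_py latex_code → Spec_prepare_for_sympy_py latex_code (prepare_for_sympy_py latex_code)

-- ===== LEMMAS AND PROOFS =====

-- clean recursive version of Python str.replace on char lists (for old ≠ [])
def pvRep (old new : List Char) : List Char → List Char
  | [] => []
  | c :: t =>
    if old.isPrefixOf (c :: t) then new ++ pvRep old new (t.drop (old.length - 1))
    else c :: pvRep old new t
termination_by l => l.length
decreasing_by all_goals simp [List.length_drop]

theorem pvRep_nil (old new : List Char) : pvRep old new [] = [] := by simp [pvRep]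

theorem pvRep_neg (old new : List Char) (c : Char) (t : List Char)
    (h : ¬ old <+: (c :: t)) : pvRep old new (c :: t) = c :: pvRep old new t := by
  rw [pvRep]
  simp [List.isPrefixOf_iff_prefix, h]

theorem pvRep_pos (old new u : List Char) (h : old ≠ []) :
    pvRep old new (old ++ u) = new ++ pvRep old new u := by
  obtain ⟨c, k, rfl⟩ : ∃ c k, old = c :: k := by
    cases old with
    | nil => exact absurd rfl h
    | cons c k => exact ⟨c, k, rfl⟩
  rw [List.cons_append, pvRep]
  have hp : (c :: k).isPrefixOf (c :: (k ++ u)) = true :=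
    List.isPrefixOf_iff_prefix.mpr ⟨u, by simp⟩
  rw [if_pos hp]
  congr 1
  simp

-- PySem.Chars.replace agrees with pvRep for nonempty old
theorem go_eq_pvRep (old new : List Char) (hold : old ≠ []) :
    ∀ fuel l acc, l.length ≤ fuel →
      PySem.Chars.replace.go old new fuel l acc = acc.reverse ++ pvRep old new l := by
  intro fuel
  induction fuel with
  | zero =>
    intro l acc hl
    have : l = [] := by
      cases l with
      | nil => rfl
      | cons c t => simp at hl
    subst this
    simp [PySem.Chars.replace.go, pvRep_nil]
  | succ m ih =>
    intro l acc hl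
    cases l with
    | nil => simp [PySem.Chars.replace.go, pvRep_nil]
    | cons c t =>
      rw [PySem.Chars.replace.go]
      by_cases hp : old.isPrefixOf (c :: t)
      · have hdrop : (c :: t).drop old.length = t.drop (old.length - 1) := by
          cases old with
          | nil => exact absurd rfl hold
          | cons a b => simp
        have hlen : ((c :: t).drop old.length).length ≤ m := by
          have h1 : 1 ≤ old.length := by
            cases old with
            | nil => exact absurd rfl hold
            | cons a b => simp
          simp only [List.length_drop, List.length_cons]
          simp only [List.length_cons] at hl
          omega
        rw [if_pos hp, ih _ _ hlen, pvRep, if_pos hp, hdrop]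
        simp
      · rw [if_neg hp, ih t (c :: acc) (by simp at hl; omega), pvRep, if_neg hp]
        simp

theorem replace_eq_pvRep (l old new : List Char) (h : old ≠ []) :
    PySem.Chars.replace l old new = pvRep old new l := by
  rw [PySem.Chars.replace]
  rw [if_neg (by simpa using h)]
  simpa using go_eq_pvRep old new h l.length l [] (le_refl _)

-- the cascade of replaces, at char-list level
def pvChain (T : List (List Char × List Char)) (l : List Char) : List Char :=
  T.foldl (fun s kv => pvRep kv.1 kv.2 s) l

theorem pvChain_nil : ∀ (T : List (List Char × List Char)), pvChain T [] = [] := by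
  intro T
  induction T with
  | nil => rfl
  | cons kv T ih => simp [pvChain, List.foldl, pvRep_nil] at ih ⊢; exact ih

-- character classes: keys are made of backslashes and letters, values of neither
def pvKeyChar (c : Char) : Bool := c == '\\' || c.isAlpha

def pvGoodKey (k : List Char) : Prop :=
  ∃ w, k = '\\' :: '\\' :: w ∧ w ≠ [] ∧ w.all Char.isAlpha = true

def pvGoodVal (v : List Char) : Prop := v ≠ [] ∧ v.all (fun c => !pvKeyChar c) = true

def pvGoodTable (T : List (List Char × List Char)) : Prop :=
  ∀ kv ∈ T, pvGoodKey kv.1 ∧ pvGoodVal kv.2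

theorem goodKey_ne_nil {k : List Char} (h : pvGoodKey k) : k ≠ [] := by
  obtain ⟨w, rfl, -, -⟩ := h; simp

-- STABLE: replacing a good key by a good value never creates a key-character prefix
theorem pvStable (k v : List Char) (hv : pvGoodVal v) :
    ∀ n (u w : List Char), u.length ≤ n → w ≠ [] → (∀ c ∈ w, pvKeyChar c = true) →
      ¬ w <+: u → ¬ w <+: pvRep k v u := by
  intro n
  induction n with
  | zero =>
    intro u w hu hw _ _
    have : u = [] := by
      cases u with
      | nil => rfl
      | cons c t => simp at hu
    subst this
    rw [pvRep_nil]
    intro hpre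
    exact hw (List.prefix_nil.mp hpre)
  | succ m ih =>
    intro u w hu hw hwc hnp
    cases u with
    | nil =>
      rw [pvRep_nil]
      intro hpre
      exact hw (List.prefix_nil.mp hpre)
    | cons c t =>
      by_cases hp : k.isPrefixOf (c :: t)
      · -- replacement fires: the result starts with v, whose head is not a key char
        rw [pvRep, if_pos hp]
        obtain ⟨a, w', rfl⟩ : ∃ a w', w = a :: w' := by
          cases w with
          | nil => exact absurd rfl hw
          | cons a w' => exact ⟨a, w', rfl⟩
        obtain ⟨b, v', rfl⟩ : ∃ b v', v = b :: v' := by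
          cases hveq : v with
          | nil => exact absurd hveq hv.1
          | cons b v' => exact ⟨b, v', rfl⟩
        intro hpre
        rw [List.cons_append, List.cons_prefix_cons] at hpre
        have h1 : pvKeyChar a = true := hwc a (by simp)
        have h2 : pvKeyChar b = false := by
          have := List.all_eq_true.mp hv.2 b (by simp)
          simpa using this
        rw [hpre.1] at h1
        rw [h2] at h1
        exact Bool.false_ne_true h1
      · rw [pvRep, if_neg hp]
        obtain ⟨a, w', rfl⟩ : ∃ a w', w = a :: w' := by
          cases w with
          | nil => exact absurd rfl hw
          | cons a w' => exact ⟨a, w', rfl⟩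
        intro hpre
        rw [List.cons_prefix_cons] at hpre
        obtain ⟨rfl, hpre'⟩ := hpre
        by_cases hw' : w' = []
        · subst hw'
          exact hnp ⟨t, by simp⟩
        · have hnp' : ¬ w' <+: t := by
            intro hh
            exact hnp (by rw [List.cons_prefix_cons]; exact ⟨rfl, hh⟩)
          exact ih t w' (by simp at hu; omega) hw' (fun d hd => hwc d (by simp [hd])) hnp' hpre'

-- a good key cannot match at the head when the head is not a backslash
theorem key_head_bs {k : List Char} (hk' : pvGoodKey k) {c : Char} {t : List Char}
    (hc : c ≠ '\\') : ¬ k <+: (c :: t) := by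
  obtain ⟨w, rfl, -, -⟩ := hk'
  intro h
  rw [List.cons_prefix_cons] at h
  exact hc h.1.symm

-- CONS step for the whole cascade when no key matches at the head
theorem pvChain_cons : ∀ (T : List (List Char × List Char)) (c : Char) (t : List Char),
    pvGoodTable T → (∀ kv ∈ T, ¬ kv.1 <+: (c :: t)) →
    pvChain T (c :: t) = c :: pvChain T t := by
  intro T
  induction T with
  | nil => intro c t _ _; rfl
  | cons kv T ih =>
    intro c t hT h
    have hkv := hT kv (by simp)
    have hstep : pvRep kv.1 kv.2 (c :: t) = c :: pvRep kv.1 kv.2 t :=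
      pvRep_neg _ _ _ _ (h kv (by simp))
    have hrest : ∀ kw ∈ T, ¬ kw.1 <+: (c :: pvRep kv.1 kv.2 t) := by
      intro kw hkw
      by_cases hc : c = '\\'
      · subst hc
        obtain ⟨w, hkweq, hwne, hwa⟩ := (hT kw (by simp [hkw])).1
        rw [hkweq]
        intro hpre
        rw [List.cons_prefix_cons] at hpre
        have htail : ¬ ('\\' :: w) <+: t := by
          intro hh
          have := h kw (by simp [hkw])
          rw [hkweq] at this
          exact this (by rw [List.cons_prefix_cons]; exact ⟨rfl, hh⟩)
        exact pvStable kv.1 kv.2 hkv.2 t.length t ('\\' :: w) (le_refl _)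
          (by simp)
          (by
            intro d hd
            rcases List.mem_cons.mp hd with rfl | hd2
            · simp [pvKeyChar]
            · simp [pvKeyChar, List.all_eq_true.mp hwa d hd2])
          htail hpre.2
      · exact key_head_bs (hT kw (by simp [hkw])).1 hc
    unfold pvChain
    simp only [List.foldl_cons]
    rw [hstep]
    exact ih c (pvRep kv.1 kv.2 t) (fun kw hkw => hT kw (by simp [hkw])) hrest

-- SKIP: one replace passes over a prefix x none of whose offsets start a match
theorem pvRep_skip (k v : List Char) :
    ∀ (x u : List Char), (∀ p, p < x.length → ¬ k <+: (x.drop p ++ u)) →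
      pvRep k v (x ++ u) = x ++ pvRep k v u := by
  intro x
  induction x with
  | nil => intro u _; simp
  | cons c x' ih =>
    intro u h
    have h0 : ¬ k <+: (c :: (x' ++ u)) := by
      have := h 0 (by simp)
      simpa using this
    rw [List.cons_append, pvRep_neg _ _ _ _ h0, ih u (fun p hp => by
      have := h (p + 1) (by simp; omega)
      simpa using this)]
    simp

-- CHAINSKIP for the cascade
theorem pvChain_skip (T : List (List Char × List Char)) :
    ∀ (x u : List Char),
      (∀ kv ∈ T, ∀ u' p, p < x.length → ¬ kv.1 <+: (x.drop p ++ u')) →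
      pvChain T (x ++ u) = x ++ pvChain T u := by
  induction T with
  | nil => intro x u _; rfl
  | cons kv T ih =>
    intro x u h
    unfold pvChain
    simp only [List.foldl_cons]
    rw [pvRep_skip kv.1 kv.2 x u (fun p hp => h kv (by simp) u p hp)]
    exact ih x (pvRep kv.1 kv.2 u) (fun kw hkw u' p hp => h kw (by simp [hkw]) u' p hp)

-- mutually non-prefix good keys never match at any offset inside each other
theorem key_no_inner (k k' : List Char) (hk : pvGoodKey k) (hk' : pvGoodKey k')
    (h1 : ¬ k' <+: k) (h2 : ¬ k <+: k') :
    ∀ (u' : List Char) p, p < k.length → ¬ k' <+: (k.drop p ++ u') := by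
  obtain ⟨w, rfl, hwne, hwa⟩ := hk
  obtain ⟨w', hk'eq, hw'ne, hw'a⟩ := hk'
  intro u' p hp hpre
  match p with
  | 0 =>
    simp only [List.drop_zero] at hpre
    rcases le_or_gt k'.length ('\\' :: '\\' :: w).length with hle | hgt
    · exact h1 (List.prefix_of_prefix_length_le hpre (List.prefix_append _ u') hle)
    · exact h2 (List.prefix_of_prefix_length_le (List.prefix_append _ u') hpre (by omega))
  | 1 =>
    simp only [List.drop_succ_cons, List.drop_zero] at hpre
    obtain ⟨a, w2, rfl⟩ : ∃ a w2, w = a :: w2 := by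
      cases w with
      | nil => exact absurd rfl hwne
      | cons a w2 => exact ⟨a, w2, rfl⟩
    rw [hk'eq, List.cons_append, List.cons_prefix_cons, List.cons_append,
      List.cons_prefix_cons] at hpre
    have ha : a.isAlpha := List.all_eq_true.mp hwa a (by simp)
    rw [← hpre.2.1] at ha
    exact absurd ha (by decide)
  | (p + 2) =>
    simp only [List.drop_succ_cons] at hpre
    have hplen : p < w.length := by simp at hp; omega
    obtain ⟨a, w2, hds⟩ : ∃ a w2, w.drop p = a :: w2 := by
      cases hdw : w.drop p with
      | nil => rw [List.drop_eq_nil_iff] at hdw; omega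
      | cons a w2 => exact ⟨a, w2, rfl⟩
    rw [hds, hk'eq, List.cons_append, List.cons_prefix_cons] at hpre
    have ha : a.isAlpha := by
      have hsub := List.drop_subset p w
      rw [hds] at hsub
      exact List.all_eq_true.mp hwa a (hsub (by simp))
    rw [← hpre.1] at ha
    exact absurd ha (by decide)

-- a good key never matches at any offset inside a good value
theorem val_no_inner (v k' : List Char) (hv : pvGoodVal v) (hk' : pvGoodKey k') :
    ∀ (u' : List Char) p, p < v.length → ¬ k' <+: (v.drop p ++ u') := by
  intro u' p hp hpre
  obtain ⟨w', hk'eq, -, -⟩ := hk'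
  obtain ⟨a, v2, hds⟩ : ∃ a v2, v.drop p = a :: v2 := by
    cases hdv : v.drop p with
    | nil => rw [List.drop_eq_nil_iff] at hdv; omega
    | cons a v2 => exact ⟨a, v2, rfl⟩
  rw [hds, hk'eq, List.cons_append, List.cons_prefix_cons] at hpre
  have ha : a ∈ v := by
    have hsub := List.drop_subset p v
    rw [hds] at hsub
    exact hsub (by simp)
  have hfa : pvKeyChar a = false := by
    have := List.all_eq_true.mp hv.2 a ha
    simpa using this
  rw [← hpre.1] at hfa
  exact absurd hfa (by decide)

-- pvTryKeys characterisations
theorem tryKeys_none (T : List (List Char × List Char)) (l : List Char)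
    (h : pvTryKeys T l = none) : ∀ kv ∈ T, ¬ kv.1 <+: l := by
  induction T with
  | nil => intro kv hkv; simp at hkv
  | cons kv T ih =>
    intro kw hkw
    rw [pvTryKeys] at h
    by_cases hp : kv.1.isPrefixOf l
    · rw [if_pos hp] at h; simp at h
    · rw [if_neg hp] at h
      rcases List.mem_cons.mp hkw with rfl | hkw2
      · rw [← List.isPrefixOf_iff_prefix]; simpa using hp
      · exact ih h kw hkw2

theorem tryKeys_some (T : List (List Char × List Char)) (l v : List Char) (n : Nat)
    (h : pvTryKeys T l = some (v, n)) :
    ∃ T1 k T2, T = T1 ++ (k, v) :: T2 ∧ (∀ kv ∈ T1, ¬ kv.1 <+: l) ∧ k <+: l ∧ n = k.length - 1 := by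
  induction T with
  | nil => simp [pvTryKeys] at h
  | cons kv T ih =>
    rw [pvTryKeys] at h
    by_cases hp : kv.1.isPrefixOf l
    · rw [if_pos hp] at h
      simp at h
      exact ⟨[], kv.1, T, by simp [← h.1], by simp, List.isPrefixOf_iff_prefix.mp hp, h.2.symm⟩
    · rw [if_neg hp] at h
      obtain ⟨T1, k, T2, hTeq, hT1, hkpre, hn⟩ := ih h
      refine ⟨kv :: T1, k, T2, by simp [hTeq], ?_, hkpre, hn⟩
      intro kw hkw
      rcases List.mem_cons.mp hkw with rfl | hkw2
      · rw [← List.isPrefixOf_iff_prefix]; simpa using hp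
      · exact hT1 kw hkw2

set_option maxRecDepth 4000 in
theorem goodTable_B : pvGoodTable pvTableB := by
  intro kv hkv
  fin_cases hkv
  · exact ⟨⟨['c','d','o','t'], by decide, by decide, by decide⟩, by decide, by decide⟩
  · exact ⟨⟨['t','i','m','e','s'], by decide, by decide, by decide⟩, by decide, by decide⟩
  · exact ⟨⟨['d','i','v'], by decide, by decide, by decide⟩, by decide, by decide⟩
  · exact ⟨⟨['p','m'], by decide, by decide, by decide⟩, by decide, by decide⟩
  · exact ⟨⟨['m','p'], by decide, by decide, by decide⟩, by decide, by decide⟩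
  · exact ⟨⟨['n','e','q'], by decide, by decide, by decide⟩, by decide, by decide⟩
  · exact ⟨⟨['l','e','q'], by decide, by decide, by decide⟩, by decide, by decide⟩
  · exact ⟨⟨['g','e','q'], by decide, by decide, by decide⟩, by decide, by decide⟩
  · exact ⟨⟨['l','l'], by decide, by decide, by decide⟩, by decide, by decide⟩
  · exact ⟨⟨['g','g'], by decide, by decide, by decide⟩, by decide, by decide⟩

set_option maxRecDepth 10000 in
theorem pairwiseB : (pvTableB.map Prod.fst).Pairwise
    (fun a b => ¬ a <+: b ∧ ¬ b <+: a) := by decide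

-- MAIN: the full cascade equals the single pass
theorem pvMain : ∀ n (l : List Char), l.length ≤ n → pvChain pvTableB l = pvSub l := by
  intro n
  induction n with
  | zero =>
    intro l hl
    have : l = [] := by
      cases l with
      | nil => rfl
      | cons c t => simp at hl
    subst this
    rw [pvChain_nil, pvSub]
  | succ m ih =>
    intro l hl
    cases l with
    | nil => rw [pvChain_nil, pvSub]
    | cons c t =>
      rw [pvSub]
      cases htry : pvTryKeys pvTableB (c :: t) with
      | none =>
        simp only
        rw [pvChain_cons pvTableB c t goodTable_B (tryKeys_none _ _ htry)]
        rw [ih t (by simp at hl; omega)]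
      | some vn =>
        obtain ⟨v, nn⟩ := vn
        simp only
        obtain ⟨T1, k, T2, hTeq, hT1, hkpre, hn⟩ := tryKeys_some _ _ _ _ htry
        have hkgood : pvGoodKey k := (goodTable_B (k, v) (by rw [hTeq]; simp)).1
        have hvgood : pvGoodVal v := (goodTable_B (k, v) (by rw [hTeq]; simp)).2
        have hkne : k ≠ [] := goodKey_ne_nil hkgood
        obtain ⟨rest, hsplit⟩ := hkpre
        have hk1 : 1 ≤ k.length := by
          cases k with
          | nil => exact absurd rfl hkne
          | cons a b => simp
        have hreslen : rest.length ≤ m := by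
          have hlen2 : k.length + rest.length = (c :: t).length := by
            rw [← hsplit]; simp
          simp at hlen2 hl
          omega
        -- the T1 stages pass over the k prefix
        have hstep1 : pvChain T1 (c :: t) = k ++ pvChain T1 rest := by
          rw [← hsplit]
          refine pvChain_skip T1 k rest ?_
          intro kv hkv u' p hp
          have hkvT : kv ∈ pvTableB := by rw [hTeq]; simp [hkv]
          have hkvgood : pvGoodKey kv.1 := (goodTable_B kv hkvT).1
          have hmut : ¬ kv.1 <+: k ∧ ¬ k <+: kv.1 := by
            have hpw := pairwiseB
            rw [hTeq] at hpw
            simp only [List.map_append, List.map_cons, List.pairwise_append] at hpw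
            exact hpw.2.2 kv.1 (List.mem_map_of_mem hkv) k (by simp)
          exact key_no_inner k kv.1 hkgood hkvgood hmut.1 hmut.2 u' p hp
        have hchain : pvChain pvTableB (c :: t)
            = pvChain T2 (pvRep k v (pvChain T1 (c :: t))) := by
          rw [hTeq]
          unfold pvChain
          rw [List.foldl_append]
          simp [List.foldl_cons]
        rw [hchain, hstep1, pvRep_pos k v _ hkne]
        -- the T2 stages pass over the v prefix
        have hstep2 : pvChain T2 (v ++ pvRep k v (pvChain T1 rest))
            = v ++ pvChain T2 (pvRep k v (pvChain T1 rest)) := by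
          refine pvChain_skip T2 v _ ?_
          intro kv hkv u' p hp
          have hkvT : kv ∈ pvTableB := by rw [hTeq]; simp [hkv]
          exact val_no_inner v kv.1 hvgood (goodTable_B kv hkvT).1 u' p hp
        rw [hstep2]
        have htail : pvChain T2 (pvRep k v (pvChain T1 rest)) = pvChain pvTableB rest := by
          rw [hTeq]
          unfold pvChain
          rw [List.foldl_append]
          simp [List.foldl_cons]
        rw [htail]
        have hdrop : t.drop nn = rest := by
          rw [hn]
          have hdl : (c :: t).drop k.length = rest := by
            rw [← hsplit, List.drop_left]
          cases k with
          | nil => exact absurd rfl hkne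
          | cons a b =>
            simp at hdl ⊢
            exact hdl
        rw [hdrop, ih rest hreslen]

-- A's cascade, at char-list level
set_option maxRecDepth 4000 in
theorem A_toList (s : String) :
    (prepare_for_sympy_py s).toList = pvChain pvTableB s.toList := by
  simp only [prepare_for_sympy_py, pvReplacements, List.foldl_cons, List.foldl_nil,
    pvChain, pvTableB]
  simp only [PySem.Str.toList_replace]
  rw [replace_eq_pvRep _ _ _ (by decide), replace_eq_pvRep _ _ _ (by decide),
    replace_eq_pvRep _ _ _ (by decide), replace_eq_pvRep _ _ _ (by decide),
    replace_eq_pvRep _ _ _ (by decide), replace_eq_pvRep _ _ _ (by decide),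
    replace_eq_pvRep _ _ _ (by decide), replace_eq_pvRep _ _ _ (by decide),
    replace_eq_pvRep _ _ _ (by decide), replace_eq_pvRep _ _ _ (by decide)]

-- ===== VERDICT (by name: the statement is the Claim_ definition above) =====
theorem prepare_for_sympy_py_spec : Claim_equal_prepare_for_sympy_py := by
  intro s _
  unfold Spec_prepare_for_sympy_py prepare_for_sympy_py_alt
  have h : (prepare_for_sympy_py s).toList = pvSub s.toList := by
    rw [A_toList, pvMain s.toList.length s.toList (le_refl _)]
  calc prepare_for_sympy_py s = String.ofList (prepare_for_sympy_py s).toList := by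
        rw [String.ofList_toList]
    _ = String.ofList (pvSub s.toList) := by rw [h]
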